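-- pv_equiv track=rewrite | github.com/Yunus-Gedik/Algorithms | HW 5/141044026_CSE321_HW5.py | opt_4
-- ===== SOURCE A (Python) =====
-- def opt_4(seq1,seq2,n,m,k):
--     cost = 0
--     for i in range(0,len(seq1)):
--         if seq1[i] == seq2[i]:
--             cost += n
--         else:
--             cost += m
--     return cost
-- ===== SOURCE B (Python) =====
-- def opt_4(seq1, seq2, n, m, k):
--     # divide and conquer on the index range: cost of [lo,hi) = cost of the two halves
--     def cost(lo, hi):
--         if hi - lo == 0:
--             return 0
--         if hi - lo == 1:
--             return n if seq1[lo] == seq2[lo] else m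
--         mid = (lo + hi) // 2
--         return cost(lo, mid) + cost(mid, hi)
--     return cost(0, len(seq1))
-- ===== Notes on version B (the rewrite author's own statement) =====
-- stated objective: alternative
-- what changed: A makes one left-to-right indexed pass with a running cost accumulator; B computes the cost by divide and conquer on the index range, splitting [lo,hi) at the floor midpoint, recursing on the two halves and adding the sub-costs (correct because the total cost is a sum over positions, so it splits at any midpoint).
import Mathlib
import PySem

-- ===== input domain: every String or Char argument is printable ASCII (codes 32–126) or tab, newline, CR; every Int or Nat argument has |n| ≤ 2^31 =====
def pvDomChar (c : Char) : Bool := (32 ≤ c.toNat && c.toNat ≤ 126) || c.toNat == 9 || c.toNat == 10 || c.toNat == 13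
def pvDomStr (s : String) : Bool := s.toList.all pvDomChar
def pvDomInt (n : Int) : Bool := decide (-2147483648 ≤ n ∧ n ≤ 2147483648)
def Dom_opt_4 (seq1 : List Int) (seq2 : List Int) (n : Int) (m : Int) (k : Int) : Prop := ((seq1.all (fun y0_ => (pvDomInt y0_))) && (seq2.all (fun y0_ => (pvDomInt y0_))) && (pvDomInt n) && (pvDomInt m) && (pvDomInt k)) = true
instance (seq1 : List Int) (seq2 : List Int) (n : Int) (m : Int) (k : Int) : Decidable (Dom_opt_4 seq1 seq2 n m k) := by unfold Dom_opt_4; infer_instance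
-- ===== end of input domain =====

-- B replaces A's left-to-right indexed accumulator loop by divide and conquer on the
-- index range (split at the midpoint, add the two half-costs); objective: alternative.

-- ===== PORT A =====
def opt_4 (seq1 : List Int) (seq2 : List Int) (n : Int) (m : Int) (k : Int) : Int :=
  (PySem.List.pyRange 0 (seq1.length : Int) 1).foldl
    (fun cost i =>
      if PySem.List.pyGetD seq1 i 0 == PySem.List.pyGetD seq2 i 0 then cost + n else cost + m) 0

-- ===== PORT B =====
-- cost from Source B, recursion made structural on a fuel argument (seq1.length is enough:
-- the range [lo,hi) shrinks by at least 1 at every split); fuel 0 is unreachable from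
-- opt_4_alt and returns 0.
def opt4Cost (seq1 seq2 : List Int) (n m : Int) : Nat → Int → Int → Int
  | 0, _, _ => 0
  | fuel + 1, lo, hi =>
    if hi - lo = 0 then 0
    else if hi - lo = 1 then
      if PySem.List.pyGetD seq1 lo 0 == PySem.List.pyGetD seq2 lo 0 then n else m
    else
      let mid := PySem.Int.floordiv (lo + hi) 2
      opt4Cost seq1 seq2 n m fuel lo mid + opt4Cost seq1 seq2 n m fuel mid hi

def opt_4_alt (seq1 : List Int) (seq2 : List Int) (n : Int) (m : Int) (k : Int) : Int :=
  opt4Cost seq1 seq2 n m seq1.length 0 (seq1.length : Int)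

-- ===== PRECONDITION & SPEC =====
-- A indexes seq2[i] for every i < len(seq1); it raises IndexError when seq2 is shorter.
def Pre_opt_4 (seq1 : List Int) (seq2 : List Int) (n : Int) (m : Int) (k : Int) : Prop :=
  seq1.length ≤ seq2.length
instance (seq1 : List Int) (seq2 : List Int) (n : Int) (m : Int) (k : Int) : Decidable (Pre_opt_4 seq1 seq2 n m k) := by unfold Pre_opt_4; infer_instance
def pvWitness_opt_4 : List Int × List Int × Int × Int × Int := ([1, 2, 3], [1, 0, 3], 2, 5, 0)
def Spec_opt_4 (seq1 : List Int) (seq2 : List Int) (n : Int) (m : Int) (k : Int) (out : Int) : Prop := out = opt_4_alt seq1 seq2 n m k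
instance (seq1 : List Int) (seq2 : List Int) (n : Int) (m : Int) (k : Int) (out : Int) : Decidable (Spec_opt_4 seq1 seq2 n m k out) := by unfold Spec_opt_4; infer_instance

-- ===== CLAIM (what is proved, stated in full; the proofs are below) =====
def Claim_equal_opt_4 : Prop := ∀ (seq1 : List Int) (seq2 : List Int) (n : Int) (m : Int) (k : Int), Dom_opt_4 seq1 seq2 n m k → Pre_opt_4 seq1 seq2 n m k → Spec_opt_4 seq1 seq2 n m k (opt_4 seq1 seq2 n m k)

-- ===== LEMMAS AND PROOFS =====
-- A's loop over any index range [lo,hi) equals c + B's divide-and-conquer cost,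
-- for any sufficient fuel.
theorem opt4_fold_eq_cost (seq1 seq2 : List Int) (n m : Int) :
    ∀ (fuel : Nat) (lo hi : Int), 0 ≤ hi - lo → (hi - lo).toNat ≤ fuel → ∀ c : Int,
      (PySem.List.pyRange lo hi 1).foldl
        (fun cost i =>
          if PySem.List.pyGetD seq1 i 0 == PySem.List.pyGetD seq2 i 0 then cost + n else cost + m) c
      = c + opt4Cost seq1 seq2 n m fuel lo hi := by
  intro fuel
  induction fuel with
  | zero =>
    intro lo hi hge hle c
    rw [PySem.List.pyRange_one_eq_nil (by omega)]
    simp [opt4Cost]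
  | succ f ih =>
    intro lo hi hge hle c
    by_cases h0 : hi - lo = 0
    · rw [PySem.List.pyRange_one_eq_nil (by omega), opt4Cost, if_pos h0]
      simp
    · by_cases h1 : hi - lo = 1
      · have hhi : hi = lo + 1 := by omega
        subst hhi
        rw [PySem.List.pyRange_one_singleton, List.foldl_cons, List.foldl_nil,
          opt4Cost, if_neg h0, if_pos h1]
        split <;> ring
      · have hmid : PySem.Int.floordiv (lo + hi) 2 = (lo + hi) / 2 :=
          PySem.Int.floordiv_eq_ediv_of_pos (by omega)
        rw [PySem.List.pyRange_one_append lo ((lo + hi) / 2) hi (by omega) (by omega),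
          List.foldl_append,
          ih lo ((lo + hi) / 2) (by omega) (by omega) c,
          ih ((lo + hi) / 2) hi (by omega) (by omega) _,
          opt4Cost, if_neg h0, if_neg h1, hmid]
        ring

-- ===== VERDICT (by name: the statement is the Claim_ definition above) =====
theorem opt_4_spec : Claim_equal_opt_4 := by
  intro seq1 seq2 n m k _ _
  show opt_4 seq1 seq2 n m k = opt_4_alt seq1 seq2 n m k
  unfold opt_4 opt_4_alt
  rw [opt4_fold_eq_cost seq1 seq2 n m seq1.length 0 (seq1.length : Int) (by omega) (by omega)]
  ring
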